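-- pv_equiv track=rewrite | github.com/maniospas/logipy | logipy/importer/text_converter.py | transform_lines
-- ===== SOURCE A (Python) =====
-- specials = '+/%,!?:;"()<>[]#$=-/\n '
--
-- logipy_keywords = []
--
-- def transform_lines(lines):
--     new_lines = ["from logipy.wrappers import LogipyPrimitive, logipy_call\n"]
--     for line in lines:
--         if line.startswith("import ") or line.startswith("from ") or line.strip().startswith("def ") or line.strip().startswith("class "):
--             new_lines.append(line)
--         else:
--             new_line = ""
--             primitive = ""
--             for c in line:
--                 if c in specials:
--                     if c == '(' and primitive and primitive not in logipy_keywords and "." != primitive[0]: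
--                         primitive = "logipy_call("+primitive+","
--                         c = ""
--                     #elif primitive and primitive not in keywords:
--                     #    primitive = "LogipyPrimitive("+primitive+")"
--                     new_line += primitive+c
--                     primitive = ""
--                 else:
--                     primitive += c
--             if primitive:
--                 new_line += "LogipyPrimitive("+primitive+")"
--             new_lines.append(new_line)
--     return new_lines
-- ===== SOURCE B (Python) =====
-- import re
--
-- specials = '+/%,!?:;"()<>[]#$=-/\n '
--
-- logipy_keywords = []
--
-- _token_re = re.compile('[^' + re.escape(specials) + ']+|[' + re.escape(specials) + ']')
--
-- def transform_lines(lines):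
--     new_lines = ["from logipy.wrappers import LogipyPrimitive, logipy_call\n"]
--     for line in lines:
--         if line.startswith("import ") or line.startswith("from ") or line.strip().startswith("def ") or line.strip().startswith("class "):
--             new_lines.append(line)
--             continue
--         tokens = _token_re.findall(line)
--         parts = []
--         i = 0
--         n = len(tokens)
--         while i < n:
--             tok = tokens[i]
--             if tok[0] in specials:          # a single separator char: emit verbatim
--                 parts.append(tok)
--                 i += 1
--             elif i + 1 == n:                # trailing primitive with no separator after it
--                 parts.append("LogipyPrimitive(" + tok + ")")
--                 i += 1
--             elif tokens[i + 1] == '(' and tok not in logipy_keywords and tok[0] != '.':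
--                 parts.append("logipy_call(" + tok + ",")   # consume the '('
--                 i += 2
--             else:
--                 parts.append(tok)
--                 i += 1
--         new_lines.append("".join(parts))
--     return new_lines
-- ===== Notes on version B (the rewrite author's own statement) =====
-- stated objective: alternative
-- what changed: B replaces A's char-by-char accumulator loop with a regex tokenization of each line into primitive-runs and single separator chars, then rewrites the token list with one-token lookahead (emitting logipy_call on a run followed by '(' and wrapping a trailing run in LogipyPrimitive).
import Mathlib
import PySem

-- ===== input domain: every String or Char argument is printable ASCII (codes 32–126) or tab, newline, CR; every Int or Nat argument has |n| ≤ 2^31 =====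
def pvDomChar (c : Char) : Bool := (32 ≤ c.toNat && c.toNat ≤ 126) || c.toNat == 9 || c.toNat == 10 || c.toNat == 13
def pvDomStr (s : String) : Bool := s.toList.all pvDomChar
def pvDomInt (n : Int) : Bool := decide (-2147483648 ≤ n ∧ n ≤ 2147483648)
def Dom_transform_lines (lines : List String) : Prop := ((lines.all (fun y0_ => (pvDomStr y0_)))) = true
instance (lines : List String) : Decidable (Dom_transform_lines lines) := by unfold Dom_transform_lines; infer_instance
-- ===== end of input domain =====

-- B tokenizes each line into primitive-runs / single separators and rewrites the token list
-- with one-token lookahead instead of A's char-by-char accumulator loop (objective: alternative).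


-- ===== PORT A =====
-- module constant: specials = '+/%,!?:;"()<>[]#$=-/\n '  ('c in specials' on a 1-char c is char membership)
def specialsL : List Char := ['+', '/', '%', ',', '!', '?', ':', ';', '"', '(', ')', '<', '>', '[', ']', '#', '$', '=', '-', '/', '\n', ' ']
-- module constant: logipy_keywords = []
def logipyKeywords : List (List Char) := []

-- the guard 'line.startswith(...) or ... line.strip().startswith(...)' as written in A
def passthroughA (line : String) : Bool :=
  PySem.Str.startswith line "import " || PySem.Str.startswith line "from " ||
  PySem.Str.startswith (PySem.Str.strip line) "def " || PySem.Str.startswith (PySem.Str.strip line) "class "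

-- one iteration of A's 'for c in line' accumulator loop; state = (new_line, primitive);
-- 'primitive[0]' is the head (nonemptiness is guaranteed by the preceding conjunct, as in Python's short-circuit)
def aStep (st : List Char × List Char) (c : Char) : List Char × List Char :=
  if c ∈ specialsL then
    if c = '(' ∧ st.2 ≠ [] ∧ st.2 ∉ logipyKeywords ∧ st.2.headD ' ' ≠ '.' then
      (st.1 ++ ("logipy_call(".toList ++ st.2 ++ [',']), [])     -- primitive rewritten, c = ""
    else
      (st.1 ++ st.2 ++ [c], [])
  else
    (st.1, st.2 ++ [c])

def transformLineA (line : List Char) : List Char :=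
  let st := line.foldl aStep ([], [])
  st.1 ++ (if st.2 ≠ [] then "LogipyPrimitive(".toList ++ st.2 ++ [')'] else [])

def transform_lines (lines : List String) : List String :=
  "from logipy.wrappers import LogipyPrimitive, logipy_call\n" ::
    lines.map (fun line => if passthroughA line then line else String.ofList (transformLineA line.toList))

-- ===== PORT B =====
-- re.findall('[^specials]+|[specials]', line): maximal runs of non-special chars and single special chars
def tokenizeB (cs : List Char) : List (List Char) :=
  match cs with
  | [] => []
  | c :: rest =>
    if c ∈ specialsL then [c] :: tokenizeB rest
    else (c :: rest.takeWhile (fun d => d ∉ specialsL)) ::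
         tokenizeB (rest.dropWhile (fun d => d ∉ specialsL))
termination_by cs.length
decreasing_by
  · simp
  · exact Nat.lt_succ_of_le (List.length_dropWhile_le _ _)

-- Source B's while loop over the token list, with one-token lookahead
def procTokensB : List (List Char) → List Char
  | [] => []
  | [tok] =>
    if tok.headD ' ' ∈ specialsL then tok        -- a lone separator: verbatim
    else "LogipyPrimitive(".toList ++ tok ++ [')']   -- trailing primitive, no separator after it
  | tok :: nxt :: rest' =>
    if tok.headD ' ' ∈ specialsL then tok ++ procTokensB (nxt :: rest')
    else if nxt = ['('] ∧ tok ∉ logipyKeywords ∧ tok.headD ' ' ≠ '.' then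
      "logipy_call(".toList ++ tok ++ [','] ++ procTokensB rest'   -- consume the '('
    else tok ++ procTokensB (nxt :: rest')

def passthroughB (line : String) : Bool :=
  PySem.Str.startswith line "import " || PySem.Str.startswith line "from " ||
  PySem.Str.startswith (PySem.Str.strip line) "def " || PySem.Str.startswith (PySem.Str.strip line) "class "

def transform_lines_alt (lines : List String) : List String :=
  "from logipy.wrappers import LogipyPrimitive, logipy_call\n" ::
    lines.map (fun line => if passthroughB line then line
                           else String.ofList (procTokensB (tokenizeB line.toList)))

-- ===== PRECONDITION & SPEC =====
def Spec_transform_lines (lines : List String) (out : List String) : Prop := out = transform_lines_alt lines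
instance (lines : List String) (out : List String) : Decidable (Spec_transform_lines lines out) := by unfold Spec_transform_lines; infer_instance

-- ===== CLAIM (what is proved, stated in full; the proofs are below) =====
def Claim_equal_transform_lines : Prop := ∀ (lines : List String), Dom_transform_lines lines → Spec_transform_lines lines (transform_lines lines)

-- ===== LEMMAS AND PROOFS =====

-- merge a pending (non-special) primitive into the head token of a token list
def consRun (p : List Char) (ts : List (List Char)) : List (List Char) :=
  if p = [] then ts
  else match ts with
    | [] => [p]
    | t :: rest => if t.headD ' ' ∈ specialsL then p :: ts else (p ++ t) :: rest

theorem consRun_tokenize (q : List Char) (hq : q ≠ []) (cs : List Char) :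
    consRun q (tokenizeB cs)
      = (q ++ cs.takeWhile (fun d => d ∉ specialsL)) ::
        tokenizeB (cs.dropWhile (fun d => d ∉ specialsL)) := by
  cases cs with
  | nil => simp [consRun, hq, tokenizeB]
  | cons d cs' =>
    by_cases hd : d ∈ specialsL
    · rw [tokenizeB]
      simp [consRun, hq, hd]
      rw [tokenizeB]
      simp [hd]
    · rw [tokenizeB]
      simp [consRun, hq, hd]

theorem main_loop (cs : List Char) : ∀ (acc prim : List Char),
    (prim ≠ [] → prim.head?.getD ' ' ∉ specialsL) →
    (let st := cs.foldl aStep (acc, prim)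
     st.1 ++ (if st.2 ≠ [] then "LogipyPrimitive(".toList ++ st.2 ++ [')'] else []))
      = acc ++ procTokensB (consRun prim (tokenizeB cs)) := by
  induction cs with
  | nil =>
    intro acc prim hp
    by_cases h : prim = []
    · simp [h, consRun, tokenizeB, procTokensB]
    · simp [h, consRun, tokenizeB, procTokensB, hp h]
  | cons c cs' ih =>
    intro acc prim hp
    have ihE := fun acc2 => ih acc2 [] (fun h => absurd rfl h)   -- IH with an empty pending primitive
    by_cases hc : c ∈ specialsL
    · rw [tokenizeB]; simp only [hc, if_pos]
      by_cases hne : prim = []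
      · subst hne
        have hstep : aStep (acc, ([] : List Char)) c = (acc ++ [c], []) := by
          simp [aStep, hc]
        rw [List.foldl_cons, hstep, ihE _]
        simp only [consRun]
        cases h' : tokenizeB cs' with
        | nil => simp [procTokensB, hc]
        | cons t ts => simp [procTokensB, hc]
      · have hp' := hp hne
        by_cases hpar : c = '('
        · subst hpar
          by_cases hdot : prim.head?.getD ' ' = '.'
          · -- '.'-prefixed primitive: no call rewrite
            have hstep : aStep (acc, prim) '(' = (acc ++ prim ++ ['('], []) := by
              simp [aStep, hc, List.headD_eq_head?_getD, hdot, hne]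
            rw [List.foldl_cons, hstep, ihE _]
            have hr : consRun prim (['('] :: tokenizeB cs') = prim :: ['('] :: tokenizeB cs' := by
              simp [consRun, hne, specialsL]
            rw [hr]
            simp only [consRun]
            cases h' : tokenizeB cs' with
            | nil => simp [procTokensB, List.headD_eq_head?_getD, hdot, specialsL]
            | cons t ts => simp [procTokensB, List.headD_eq_head?_getD, hdot, specialsL]
          · -- the logipy_call branch
            have hstep : aStep (acc, prim) '('
                = (acc ++ ("logipy_call(".toList ++ prim ++ [',']), []) := by
              simp [aStep, hc, List.headD_eq_head?_getD, hdot, hne, logipyKeywords]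
            rw [List.foldl_cons, hstep, ihE _]
            have hr : consRun prim (['('] :: tokenizeB cs') = prim :: ['('] :: tokenizeB cs' := by
              simp [consRun, hne, specialsL]
            rw [hr]
            simp only [consRun]
            simp [procTokensB, List.headD_eq_head?_getD, hp', hdot, logipyKeywords]
        · -- other separator: primitive flushed verbatim
          have hstep : aStep (acc, prim) c = (acc ++ prim ++ [c], []) := by
            simp [aStep, hc, hpar]
          rw [List.foldl_cons, hstep, ihE _]
          have hr : consRun prim ([c] :: tokenizeB cs') = prim :: [c] :: tokenizeB cs' := by
            simp [consRun, hne, hc]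
          rw [hr]
          simp only [consRun]
          cases h' : tokenizeB cs' with
          | nil => simp [procTokensB, List.headD_eq_head?_getD, hp', hpar, hc]
          | cons t ts => simp [procTokensB, List.headD_eq_head?_getD, hp', hpar, hc]
    · have hnh : (prim ++ [c]) ≠ [] → (prim ++ [c]).head?.getD ' ' ∉ specialsL := by
        intro _
        cases prim with
        | nil => simpa using hc
        | cons a p' => simpa using hp (by simp)
      have hstep : aStep (acc, prim) c = (acc, prim ++ [c]) := by
        simp [aStep, hc]
      rw [List.foldl_cons, hstep, ih _ (prim ++ [c]) hnh]
      rw [consRun_tokenize (prim ++ [c]) (by simp) cs']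
      by_cases hne : prim = []
      · subst hne
        simp only [consRun]
        rw [tokenizeB]
        simp [hc]
      · rw [consRun_tokenize prim hne (c :: cs')]
        simp [hc]

theorem transformLine_eq (cs : List Char) :
    transformLineA cs = procTokensB (tokenizeB cs) := by
  have := main_loop cs [] [] (fun h => absurd rfl h)
  simpa [transformLineA, consRun] using this

-- ===== VERDICT (by name: the statement is the Claim_ definition above) =====
theorem transform_lines_spec : Claim_equal_transform_lines := by
  intro lines _
  unfold Spec_transform_lines transform_lines transform_lines_alt passthroughA passthroughB
  simp [transformLine_eq]
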